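-- pv_equiv track=rewrite | github.com/afscg/Euler | 38.py | isCon
-- ===== SOURCE A (Python) =====
-- def isCon(base, n, remain):
--     product = str(base * n)
--     if remain.startswith(product):
--         remain = remain[len(product):]
--         if len(remain) == 0:
--             return True
--         return isCon(base, n + 1, remain)
--     return False
-- ===== SOURCE B (Python) =====
-- def isCon(base, n, remain):
--     # Build the greedy concatenation of consecutive multiples until it is at
--     # least as long as `remain`, then compare once.
--     s = str(base * n)
--     while len(s) < len(remain):
--         n += 1
--         s += str(base * n)
--     return s == remain
-- ===== Notes on version B (the rewrite author's own statement) =====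
-- stated objective: simpler
-- what changed: A recursively checks and strips one multiple's prefix per call; B iteratively builds the full greedy concatenation of consecutive multiples until it reaches the target length and does a single string comparison.
import Mathlib
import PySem

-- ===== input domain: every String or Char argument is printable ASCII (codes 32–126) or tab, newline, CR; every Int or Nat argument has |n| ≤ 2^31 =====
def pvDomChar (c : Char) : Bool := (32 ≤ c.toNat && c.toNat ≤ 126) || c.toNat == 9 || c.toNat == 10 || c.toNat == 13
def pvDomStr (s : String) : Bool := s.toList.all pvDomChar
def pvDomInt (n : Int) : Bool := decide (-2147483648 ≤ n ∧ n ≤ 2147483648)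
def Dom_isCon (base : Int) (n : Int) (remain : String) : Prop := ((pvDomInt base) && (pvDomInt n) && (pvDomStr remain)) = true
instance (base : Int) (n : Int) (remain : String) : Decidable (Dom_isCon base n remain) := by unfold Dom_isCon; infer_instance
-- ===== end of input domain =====

-- B replaces A's consume-a-prefix recursion by building the greedy concatenation of
-- consecutive multiples once and comparing it to `remain` with a single equality test
-- (objective: simpler).

-- the digit accumulator of Nat.toDigitsCore never shrinks (cited by pvToChars_len)
theorem pvToDigitsCore_mono (b : Nat) : ∀ (fuel n : Nat) (ds : List Char),
    ds.length ≤ (Nat.toDigitsCore b fuel n ds).length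
  | 0, _, _ => le_refl _
  | fuel + 1, n, ds => by
    rw [Nat.toDigitsCore]
    split
    · simp
    · exact le_trans (by simp) (pvToDigitsCore_mono b fuel _ _)

-- str(m) is never the empty string (cited by both ports' decreasing_by).
theorem pvToChars_len (m : Int) : 1 ≤ (PySem.Int.toChars m).length := by
  unfold PySem.Int.toChars
  split
  · simp
  · show 1 ≤ (Nat.toDigits 10 m.toNat).length
    unfold Nat.toDigits
    rw [Nat.toDigitsCore]
    split
    · simp
    · exact le_trans (by simp) (pvToDigitsCore_mono 10 _ _ _)

-- ===== PORT A =====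
-- A on the character-list view of `remain` (PySem string ops are defined on List Char).
def isConRec (base : Int) (n : Int) (remain : List Char) : Bool :=
  if PySem.Chars.startswith remain (PySem.Int.toChars (base * n)) then
    if (PySem.List.slice remain (some ((PySem.Int.toChars (base * n)).length : Int)) none).length = 0 then
      true
    else
      isConRec base (n + 1) (PySem.List.slice remain (some ((PySem.Int.toChars (base * n)).length : Int)) none)
  else
    false
termination_by remain.length
decreasing_by
  rename_i _ h2
  have hp := pvToChars_len (base * n)
  simp only [PySem.List.slice_from_natCast, List.length_drop] at h2 ⊢
  omega

def isCon (base : Int) (n : Int) (remain : String) : Bool :=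
  isConRec base n remain.toList

-- ===== PORT B =====
-- Source B's while loop: grow `s` by the next multiple while it is shorter than the target.
def isConBuild (base : Int) (n : Int) (s : List Char) (len : Nat) : List Char :=
  if s.length < len then
    isConBuild base (n + 1) (s ++ PySem.Int.toChars (base * (n + 1))) len
  else
    s
termination_by len - s.length
decreasing_by
  rename_i h
  have hq := pvToChars_len (base * (n + 1))
  simp only [List.length_append]
  omega

def isCon_alt (base : Int) (n : Int) (remain : String) : Bool :=
  isConBuild base n (PySem.Int.toChars (base * n)) remain.toList.length == remain.toList

-- ===== PRECONDITION & SPEC =====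
def Spec_isCon (base : Int) (n : Int) (remain : String) (out : Bool) : Prop := out = isCon_alt base n remain
instance (base : Int) (n : Int) (remain : String) (out : Bool) : Decidable (Spec_isCon base n remain out) := by unfold Spec_isCon; infer_instance

-- ===== CLAIM (what is proved, stated in full; the proofs are below) =====
def Claim_equal_isCon : Prop := ∀ (base : Int) (n : Int) (remain : String), Dom_isCon base n remain → Spec_isCon base n remain (isCon base n remain)

-- ===== LEMMAS AND PROOFS =====

-- the built string always extends the accumulator
theorem pvBuild_prefix (base n : Int) (s : List Char) (len : Nat) :
    s <+: isConBuild base n s len := by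
  fun_induction isConBuild base n s len with
  | case1 n s h ih =>
    exact List.IsPrefix.trans (List.prefix_append s _) ih
  | case2 n s h =>
    exact List.prefix_refl s

-- the loop state factors through any already-matched prefix p
theorem pvBuild_shift (base : Int) (p : List Char) (n : Int) (s : List Char) (len : Nat) :
    isConBuild base n (p ++ s) (p.length + len) = p ++ isConBuild base n s len := by
  fun_induction isConBuild base n s len with
  | case1 n s h ih =>
    rw [isConBuild]
    have hc : (p ++ s).length < p.length + len := by simp; omega
    simp only [hc, if_true]
    rw [List.append_assoc]
    exact ih
  | case2 n s h =>
    rw [isConBuild]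
    have hc : ¬ (p ++ s).length < p.length + len := by simp; omega
    simp only [hc, if_false]

theorem pvMain (base n : Int) (remain : List Char) :
    isConRec base n remain =
      (isConBuild base n (PySem.Int.toChars (base * n)) remain.length == remain) := by
  fun_induction isConRec base n remain with
  | case1 n remain h1 h2 =>
    -- matched and nothing left: remain = product
    obtain ⟨r, hr⟩ := (PySem.Chars.startswith_iff remain (PySem.Int.toChars (base * n))).mp h1
    subst hr
    simp only [PySem.List.slice_from_natCast, List.drop_left, List.length_eq_zero_iff] at h2
    subst h2
    rw [isConBuild]
    simp
  | case2 n remain h1 h2 ih =>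
    -- matched and something left: peel the prefix on both sides
    obtain ⟨r, hr⟩ := (PySem.Chars.startswith_iff remain (PySem.Int.toChars (base * n))).mp h1
    subst hr
    simp only [PySem.List.slice_from_natCast, List.drop_left] at h2 ih ⊢
    set p := PySem.Int.toChars (base * n) with hp
    have hr0 : r ≠ [] := by simpa [List.length_eq_zero_iff] using h2
    rw [isConBuild]
    have hc : p.length < (p ++ r).length := by
      simp only [List.length_append]
      have : 0 < r.length := List.length_pos_iff.mpr hr0
      omega
    simp only [hc, if_true]
    have hlen : (p ++ r).length = p.length + r.length := List.length_append
    rw [hlen, pvBuild_shift]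
    have hcancel :
        (p ++ isConBuild base (n + 1) (PySem.Int.toChars (base * (n + 1))) r.length == p ++ r)
          = (isConBuild base (n + 1) (PySem.Int.toChars (base * (n + 1))) r.length == r) := by
      by_cases hx : isConBuild base (n + 1) (PySem.Int.toChars (base * (n + 1))) r.length = r <;>
        simp [hx]
    rw [hcancel, ih]
  | case3 n remain h1 =>
    -- no match: the built string starts with product, so it cannot equal remain
    rw [eq_comm, beq_eq_false_iff_ne]
    intro heq
    have hpre := pvBuild_prefix base n (PySem.Int.toChars (base * n)) remain.length
    rw [heq] at hpre
    exact h1 ((PySem.Chars.startswith_iff remain (PySem.Int.toChars (base * n))).mpr hpre)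

-- ===== VERDICT (by name: the statement is the Claim_ definition above) =====
theorem isCon_spec : Claim_equal_isCon := by
  intro base n remain _
  unfold Spec_isCon isCon isCon_alt
  exact pvMain base n remain.toList
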